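-- pv_equiv track=rewrite | github.com/wdi2020/wdi_python | pojebane_pomysly/zad1.py | check_skoczek
-- ===== SOURCE A (Python) =====
-- def check_skoczek(tab):
--     def can_move(x,y):
--         if x >= 0 and x < len(tab) and y>= 0 and y< len(tab):
--             return True
--         return False
--     ruchy = ((1,2),(1,-2),(2,1),(2,-1))
--     n = len(tab)
--     for i in range(n):
--         for j in range(n):
--             for elem in ruchy:
--                 if can_move(i+elem[0],j+elem[1]):
--                     if tab[i][j] == tab[i+elem[0]][j+elem[1]]:
--                         return False
--     return True
-- ===== SOURCE B (Python) =====
-- def check_skoczek(tab):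
--     n = len(tab)
--     pos = {}
--     for i in range(n):
--         for j in range(n):
--             pos.setdefault(tab[i][j], []).append((i, j))
--     for pts in pos.values():
--         for k in range(len(pts)):
--             i1, j1 = pts[k]
--             for l in range(k + 1, len(pts)):
--                 i2, j2 = pts[l]
--                 di = abs(i1 - i2)
--                 dj = abs(j1 - j2)
--                 if (di == 1 and dj == 2) or (di == 2 and dj == 1):
--                     return False
--     return True
-- ===== Notes on version B (the rewrite author's own statement) =====
-- stated objective: alternative
-- what changed: Instead of scanning each cell's four forward knight moves with bounds checks, B builds a dict mapping each value to the list of positions holding it and then tests, within every value group, whether any pair of positions is knight-adjacent (|di|,|dj| a permutation of (1,2)).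
-- outside the precondition, e.g. on check_skoczek([[1, 2, 3], [4, 5, 1], [7]]): A returns False, B raises IndexError; on check_skoczek([[1], [2, 3]]): A returns True, B raises IndexError
import Mathlib
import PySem

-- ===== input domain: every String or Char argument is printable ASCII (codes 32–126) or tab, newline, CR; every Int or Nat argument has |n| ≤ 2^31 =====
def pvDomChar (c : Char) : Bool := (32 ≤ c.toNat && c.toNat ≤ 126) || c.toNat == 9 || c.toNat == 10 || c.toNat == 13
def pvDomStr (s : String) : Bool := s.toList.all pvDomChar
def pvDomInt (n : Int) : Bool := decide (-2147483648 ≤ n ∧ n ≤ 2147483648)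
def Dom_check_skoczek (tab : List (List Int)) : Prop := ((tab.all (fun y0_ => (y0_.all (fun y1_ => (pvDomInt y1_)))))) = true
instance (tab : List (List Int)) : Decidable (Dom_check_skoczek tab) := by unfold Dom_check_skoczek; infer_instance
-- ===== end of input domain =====

-- B replaces A's per-cell scan of the four forward knight moves by a value → positions
-- index and a knight-adjacency test inside each value group (alternative decomposition,
-- same result; equivalence is about the return value, neither program mutates tab).

-- tab[i][j] (both ports index only where Pre_ guarantees the index is in range)
def pvCell (tab : List (List Int)) (i j : Int) : Int :=
  PySem.List.pyGetD (PySem.List.pyGetD tab i []) j 0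

-- ===== PORT A =====
def check_skoczek (tab : List (List Int)) : Bool :=
  let n : Int := tab.length
  let canMove (x y : Int) : Bool :=
    decide (0 ≤ x) && decide (x < n) && decide (0 ≤ y) && decide (y < n)
  let ruchy : List (Int × Int) := [(1, 2), (1, -2), (2, 1), (2, -1)]
  (PySem.List.pyRange 0 n 1).all fun i =>
    (PySem.List.pyRange 0 n 1).all fun j =>
      ruchy.all fun elem =>
        if canMove (i + elem.1) (j + elem.2) then
          !(pvCell tab i j == pvCell tab (i + elem.1) (j + elem.2))
        else true

-- ===== PORT B =====
-- the body of Source B's inner pair test: (di == 1 and dj == 2) or (di == 2 and dj == 1)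
def pvKnightHit (p q : Int × Int) : Bool :=
  let di := |p.1 - q.1|
  let dj := |p.2 - q.2|
  (di == 1 && dj == 2) || (di == 2 && dj == 1)

def check_skoczek_alt (tab : List (List Int)) : Bool :=
  let n : Int := tab.length
  let pos : PySem.Dict Int (List (Int × Int)) :=
    (PySem.List.pyRange 0 n 1).foldl (fun d i =>
      (PySem.List.pyRange 0 n 1).foldl (fun d j =>
        d.modify (pvCell tab i j) [] (· ++ [(i, j)])) d) PySem.Dict.empty
  pos.values.all fun pts =>
    (PySem.List.pyRange 0 (pts.length : Int) 1).all fun k =>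
      (PySem.List.pyRange (k + 1) (pts.length : Int) 1).all fun l =>
        !(pvKnightHit (PySem.List.pyGetD pts k (0, 0)) (PySem.List.pyGetD pts l (0, 0)))

-- ===== PRECONDITION & SPEC =====
-- Pre_ excludes ragged tables (some row shorter than len(tab)): there Python indexes
-- tab[i][j] out of range — A raises IndexError unless it returns False first or
-- len(tab) ≤ 2 never reaches an index, and B's index builder raises IndexError.
def Pre_check_skoczek (tab : List (List Int)) : Prop :=
  ∀ row ∈ tab, tab.length ≤ row.length
instance (tab : List (List Int)) : Decidable (Pre_check_skoczek tab) := by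
  unfold Pre_check_skoczek; infer_instance
def pvWitness_check_skoczek : List (List Int) := [[0, 1], [2, 3]]

def Spec_check_skoczek (tab : List (List Int)) (out : Bool) : Prop := out = check_skoczek_alt tab
instance (tab : List (List Int)) (out : Bool) : Decidable (Spec_check_skoczek tab out) := by
  unfold Spec_check_skoczek; infer_instance

-- ===== CLAIM (what is proved, stated in full; the proofs are below) =====
def Claim_equal_check_skoczek : Prop := ∀ (tab : List (List Int)), Dom_check_skoczek tab → Pre_check_skoczek tab → Spec_check_skoczek tab (check_skoczek tab)

-- ===== LEMMAS AND PROOFS =====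

-- the row-major list of board coordinates, the cell values, knight adjacency, and
-- "some knight-adjacent pair of cells shares a value" (both programs decide exactly this)
def pvCells (tab : List (List Int)) : List (Int × Int) :=
  (PySem.List.pyRange 0 (tab.length : Int) 1).flatMap fun i =>
    (PySem.List.pyRange 0 (tab.length : Int) 1).map fun j => (i, j)

def pvVal (tab : List (List Int)) (p : Int × Int) : Int := pvCell tab p.1 p.2

def pvK (p q : Int × Int) : Prop :=
  ((p.1 - q.1).natAbs = 1 ∧ (p.2 - q.2).natAbs = 2) ∨ ((p.1 - q.1).natAbs = 2 ∧ (p.2 - q.2).natAbs = 1)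

def pvBad (tab : List (List Int)) : Prop :=
  ∃ p q, p ∈ pvCells tab ∧ q ∈ pvCells tab ∧ pvVal tab p = pvVal tab q ∧ pvK p q

def pvPos (tab : List (List Int)) : PySem.Dict Int (List (Int × Int)) :=
  ((pvCells tab).map (fun c => (pvVal tab c, c))).foldl
    (fun d q => d.modify q.1 [] (· ++ [q.2])) PySem.Dict.empty

lemma mem_pvCells (tab : List (List Int)) (p : Int × Int) :
    p ∈ pvCells tab ↔ 0 ≤ p.1 ∧ p.1 < (tab.length : Int) ∧ 0 ≤ p.2 ∧ p.2 < (tab.length : Int) := by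
  obtain ⟨a, b⟩ := p
  simp [pvCells, List.mem_flatMap, PySem.List.mem_pyRange_one]
  tauto

lemma check_skoczek_true_iff (tab : List (List Int)) :
    check_skoczek tab = true ↔ ¬ pvBad tab := by
  simp only [check_skoczek, List.all_eq_true, PySem.List.mem_pyRange_one, List.mem_cons,
    List.not_mem_nil, or_false]
  constructor
  · intro hA ⟨p, q, hp, hq, hval, hK⟩
    rw [mem_pvCells] at hp hq
    have key : ∃ (r s e : Int × Int),
        (e = (1,2) ∨ e = (1,-2) ∨ e = (2,1) ∨ e = (2,-1)) ∧
        ((r = p ∧ s = q) ∨ (r = q ∧ s = p)) ∧ s.1 = r.1 + e.1 ∧ s.2 = r.2 + e.2 := by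
      rcases hK with ⟨h1, h2⟩ | ⟨h1, h2⟩ <;>
        rcases Int.natAbs_eq_iff.mp h1 with h1 | h1 <;>
        rcases Int.natAbs_eq_iff.mp h2 with h2 | h2 <;>
        first
          | exact ⟨p, q, (1, 2), by simp, by simp, by omega, by omega⟩
          | exact ⟨p, q, (1, -2), by simp, by simp, by omega, by omega⟩
          | exact ⟨p, q, (2, 1), by simp, by simp, by omega, by omega⟩
          | exact ⟨p, q, (2, -1), by simp, by simp, by omega, by omega⟩
          | exact ⟨q, p, (1, 2), by simp, by simp, by omega, by omega⟩
          | exact ⟨q, p, (1, -2), by simp, by simp, by omega, by omega⟩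
          | exact ⟨q, p, (2, 1), by simp, by simp, by omega, by omega⟩
          | exact ⟨q, p, (2, -1), by simp, by simp, by omega, by omega⟩
    obtain ⟨r, s, e, he, hor, hs1, hs2⟩ := key
    have hrb : 0 ≤ r.1 ∧ r.1 < (tab.length : Int) ∧ 0 ≤ r.2 ∧ r.2 < (tab.length : Int) := by
      rcases hor with ⟨rfl, rfl⟩ | ⟨rfl, rfl⟩
      · exact ⟨hp.1, hp.2.1, hp.2.2.1, hp.2.2.2⟩
      · exact ⟨hq.1, hq.2.1, hq.2.2.1, hq.2.2.2⟩
    have hsb : 0 ≤ s.1 ∧ s.1 < (tab.length : Int) ∧ 0 ≤ s.2 ∧ s.2 < (tab.length : Int) := by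
      rcases hor with ⟨rfl, rfl⟩ | ⟨rfl, rfl⟩
      · exact ⟨hq.1, hq.2.1, hq.2.2.1, hq.2.2.2⟩
      · exact ⟨hp.1, hp.2.1, hp.2.2.1, hp.2.2.2⟩
    have hA' := hA r.1 ⟨hrb.1, hrb.2.1⟩ r.2 ⟨hrb.2.2.1, hrb.2.2.2⟩ e he
    rw [if_pos (by simp; omega)] at hA'
    simp only [Bool.not_eq_eq_eq_not, Bool.not_true, beq_eq_false_iff_ne, ne_eq] at hA'
    apply hA'
    have : pvCell tab r.1 r.2 = pvCell tab s.1 s.2 := by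
      rcases hor with ⟨rfl, rfl⟩ | ⟨rfl, rfl⟩
      · exact hval
      · exact hval.symm
    rw [← hs1, ← hs2]
    exact this
  · intro hnb i hi j hj e he
    split_ifs with hc
    · simp only [Bool.not_eq_eq_eq_not, Bool.not_true, beq_eq_false_iff_ne, ne_eq]
      intro heq
      simp only [Bool.and_eq_true, decide_eq_true_eq] at hc
      exact hnb ⟨(i, j), (i + e.1, j + e.2),
        (mem_pvCells tab _).mpr ⟨hi.1, hi.2, hj.1, hj.2⟩,
        (mem_pvCells tab _).mpr (by exact ⟨hc.1.1.1, hc.1.1.2, hc.1.2, hc.2⟩),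
        heq,
        by rcases he with rfl | rfl | rfl | rfl <;> simp [pvK]⟩
    · rfl

lemma knight_iff (p q : Int × Int) : pvKnightHit p q = true ↔ pvK p q := by
  simp only [pvKnightHit, pvK, Bool.or_eq_true, Bool.and_eq_true, beq_iff_eq,
    Int.abs_eq_natAbs]
  omega

lemma pos_eq (tab : List (List Int)) :
    ((PySem.List.pyRange 0 (tab.length : Int) 1).foldl (fun d i =>
      (PySem.List.pyRange 0 (tab.length : Int) 1).foldl (fun d j =>
        d.modify (pvCell tab i j) [] (· ++ [(i, j)])) d) PySem.Dict.empty)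
    = pvPos tab := by
  rw [pvPos, pvCells, List.map_flatMap, List.foldl_flatMap]
  simp only [List.foldl_map, pvVal]

lemma group_eq (tab : List (List Int)) (v : Int) :
    (pvPos tab).getD v [] = (pvCells tab).filter (fun c => pvVal tab c == v) := by
  rw [pvPos, PySem.Dict.getD_foldl_modify_append]
  simp [List.filter_map, Function.comp_def]

lemma keys_eq (tab : List (List Int)) :
    (pvPos tab).keys = PySem.Set.ofList ((pvCells tab).map (pvVal tab)) := by
  rw [pvPos]
  rw [PySem.Dict.keys_foldl_modify_key (key := Prod.fst)]
  simp [PySem.Dict.keys_empty, List.map_map, Function.comp_def]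
  rfl

lemma nodup_keys (tab : List (List Int)) : (pvPos tab).keys.Nodup := by
  rw [pvPos]
  exact PySem.Dict.nodup_keys_foldl_modify_key _ _ _ _ _ PySem.Dict.nodup_keys_empty

lemma values_eq (tab : List (List Int)) :
    (pvPos tab).values = (pvPos tab).keys.map (fun v => (pvPos tab).getD v []) :=
  PySem.Dict.values_eq_map_keys _ (nodup_keys tab) []

lemma pvK_symm {p q : Int × Int} (h : pvK p q) : pvK q p := by
  unfold pvK at h ⊢; omega

lemma pvK_ne {p q : Int × Int} (h : pvK p q) : p ≠ q := by
  intro he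
  rw [he] at h
  unfold pvK at h
  omega

lemma check_skoczek_alt_true_iff (tab : List (List Int)) :
    check_skoczek_alt tab = true ↔ ¬ pvBad tab := by
  simp only [check_skoczek_alt, pos_eq tab, values_eq tab, keys_eq tab, group_eq tab,
    List.all_eq_true, List.mem_map, PySem.Set.mem_ofList, PySem.List.mem_pyRange_one]
  constructor
  · intro hB ⟨p, q, hp, hq, hval, hK⟩
    set v := pvVal tab p with hv
    set g := (pvCells tab).filter (fun c => pvVal tab c == v) with hg
    have hpg : p ∈ g := List.mem_filter.mpr ⟨hp, by simp [hv]⟩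
    have hqg : q ∈ g := List.mem_filter.mpr ⟨hq, by simp [← hval]⟩
    obtain ⟨ki, hki, hpk⟩ := List.mem_iff_getElem.mp hpg
    obtain ⟨li, hli, hql⟩ := List.mem_iff_getElem.mp hqg
    have hne : ki ≠ li := by
      intro h
      subst h
      exact pvK_ne hK (hpk.symm.trans hql)
    have main : ∀ (a b : Nat) (ha : a < g.length) (hb : b < g.length), a < b →
        pvK (g[a]'ha) (g[b]'hb) → False := by
      intro a b ha hb hab hKab
      have hstep := hB g ⟨v, ⟨p, hp, hv.symm⟩, hg.symm⟩ (a : Int)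
        ⟨Int.natCast_nonneg a, by exact_mod_cast ha⟩ (b : Int)
        ⟨by exact_mod_cast hab, by exact_mod_cast hb⟩
      rw [PySem.List.pyGetD_eq_getElem g _ (Int.natCast_nonneg a) (by exact_mod_cast ha),
          PySem.List.pyGetD_eq_getElem g _ (Int.natCast_nonneg b) (by exact_mod_cast hb)] at hstep
      simp only [Int.toNat_natCast] at hstep
      rw [(knight_iff _ _).mpr hKab] at hstep
      simp at hstep
    rcases Nat.lt_or_ge ki li with h | h
    · exact main ki li hki hli h (by rw [hpk, hql]; exact hK)
    · exact main li ki hli hki (by omega) (by rw [hpk, hql]; exact pvK_symm hK)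
  · intro hnb pts hpts k hk l hl
    obtain ⟨v, ⟨p0, hp0, hv0⟩, hpts⟩ := hpts
    subst hpts
    set g := (pvCells tab).filter (fun c => pvVal tab c == v) with hg
    have hklen : k.toNat < g.length := by omega
    have hllen : l.toNat < g.length := by omega
    rw [PySem.List.pyGetD_eq_getElem g _ hk.1 (by omega),
        PySem.List.pyGetD_eq_getElem g _ (by omega) (by omega)]
    cases hx : pvKnightHit (g[k.toNat]'hklen) (g[l.toNat]'hllen) with
    | false => rfl
    | true =>
        exfalso
        apply hnb
        have hpm := List.mem_filter.mp (List.getElem_mem (l := g) (n := k.toNat) hklen)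
        have hqm := List.mem_filter.mp (List.getElem_mem (l := g) (n := l.toNat) hllen)
        refine ⟨_, _, hpm.1, hqm.1, ?_, (knight_iff _ _).mp hx⟩
        have h1 := hpm.2
        have h2 := hqm.2
        simp only [beq_iff_eq] at h1 h2
        rw [h1, h2]

-- ===== VERDICT (by name: the statement is the Claim_ definition above) =====
theorem check_skoczek_spec : Claim_equal_check_skoczek := by
  intro tab _ _
  unfold Spec_check_skoczek
  have hA := check_skoczek_true_iff tab
  have hB := check_skoczek_alt_true_iff tab
  cases hval : check_skoczek_alt tab with
  | true => exact hA.mpr (hB.mp hval)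
  | false =>
      cases h : check_skoczek tab with
      | false => rfl
      | true => exact absurd hval (by simp [hB.mpr (hA.mp h)])
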